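-- pv_equiv track=rewrite | github.com/nineztech/OPPZ_Resume_Ai | parse_service/parser/sections/reference_parser.py | is_duplicate_reference
-- ===== SOURCE A (Python) =====
-- def is_duplicate_reference(current_ref, existing_references):
--     """Check if reference is a duplicate"""
--     if not current_ref["name"]:
--         return False
--
--     for ref in existing_references:
--         # Check if names match (case insensitive)
--         if (current_ref["name"].lower() == ref["name"].lower() and
--             ref["name"]):  # Only if existing ref has a name
--             return True
--
--         # Check if email matches
--         if (current_ref["email"] and ref["email"] and
--             current_ref["email"].lower() == ref["email"].lower()):
--             return True
--
--         # Check if phone matches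
--         if (current_ref["phone"] and ref["phone"] and
--             current_ref["phone"] == ref["phone"]):
--             return True
--
--     return False
-- ===== SOURCE B (Python) =====
-- def is_duplicate_reference(current_ref, existing_references):
--     """Check if reference is a duplicate"""
--     if not current_ref["name"]:
--         return False
--     if not existing_references:
--         return False
--     # loop interchange: one pass over existing_references per field, driven by a table
--     for key, fold in (("name", True), ("email", True), ("phone", False)):
--         cur = current_ref[key]
--         if not cur:
--             continue
--         target = cur.lower() if fold else cur
--         if any(v and (v.lower() if fold else v) == target
--                for v in (ref.get(key, "") for ref in existing_references)):
--             return True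
--     return False
-- ===== Notes on version B (the rewrite author's own statement) =====
-- stated objective: alternative
-- what changed: Loop interchange: B iterates over a data-driven table of (field, case-fold) passes, scanning existing_references once per field, instead of A's single reference loop with three hardcoded per-field checks.
import Mathlib
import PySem

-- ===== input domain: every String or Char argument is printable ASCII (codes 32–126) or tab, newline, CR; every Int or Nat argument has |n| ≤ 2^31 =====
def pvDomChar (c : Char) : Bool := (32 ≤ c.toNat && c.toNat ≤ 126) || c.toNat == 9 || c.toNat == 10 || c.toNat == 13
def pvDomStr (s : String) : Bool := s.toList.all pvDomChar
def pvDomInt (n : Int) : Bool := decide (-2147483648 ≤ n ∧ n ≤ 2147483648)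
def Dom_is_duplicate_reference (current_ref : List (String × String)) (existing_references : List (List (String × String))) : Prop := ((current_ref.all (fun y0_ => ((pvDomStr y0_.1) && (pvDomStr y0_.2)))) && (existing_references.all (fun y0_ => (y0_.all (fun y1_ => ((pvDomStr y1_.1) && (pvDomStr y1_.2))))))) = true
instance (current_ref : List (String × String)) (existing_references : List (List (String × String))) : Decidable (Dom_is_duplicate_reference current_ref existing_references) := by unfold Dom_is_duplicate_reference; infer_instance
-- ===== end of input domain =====

-- B swaps the loop nesting: a data-driven table of (field, case-fold) passes, each scanning
-- existing_references once, instead of A's single reference loop with three hardcoded checks;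
-- B reads refs' fields with .get and exits early on an empty list.


-- d[k] / d.get(k, "") on an association list: first match, "" when absent
def pvField (d : List (String × String)) (k : String) : String :=
  ((PySem.Dict.mk d).get? k).getD ""

-- ===== PORT A =====
-- the for-loop over existing_references, with A's three checks in A's order
def pvScanA (current_ref : List (String × String)) : List (List (String × String)) → Bool
  | [] => false
  | ref :: rest =>
    if PySem.Str.lower (pvField current_ref "name") == PySem.Str.lower (pvField ref "name")
        && pvField ref "name" != "" then true
    else if pvField current_ref "email" != "" && pvField ref "email" != ""
        && PySem.Str.lower (pvField current_ref "email") == PySem.Str.lower (pvField ref "email") then true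
    else if pvField current_ref "phone" != "" && pvField ref "phone" != ""
        && pvField current_ref "phone" == pvField ref "phone" then true
    else pvScanA current_ref rest

def is_duplicate_reference (current_ref : List (String × String)) (existing_references : List (List (String × String))) : Bool :=
  if pvField current_ref "name" = "" then false
  else pvScanA current_ref existing_references

-- ===== PORT B =====
-- cur.lower() if fold else cur
def pvNorm (fold : Bool) (s : String) : String :=
  match fold with
  | true => PySem.Str.lower s
  | false => s
-- any(v and (v.lower() if fold else v) == target for v in (ref.get(key,"") for ref in exs))
def pvAnyB (exs : List (List (String × String))) (key target : String) (fold : Bool) : Bool :=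
  exs.any (fun ref => (pvField ref key != "") && (pvNorm fold (pvField ref key) == target))
-- the for-loop over the field table
def pvLoopB (cur : List (String × String)) (exs : List (List (String × String))) :
    List (String × Bool) → Bool
  | [] => false
  | (key, fold) :: rest =>
    let c := pvField cur key
    if c = "" then pvLoopB cur exs rest
    else if pvAnyB exs key (pvNorm fold c) fold then true
    else pvLoopB cur exs rest

def is_duplicate_reference_alt (current_ref : List (String × String)) (existing_references : List (List (String × String))) : Bool :=
  if pvField current_ref "name" = "" then false
  else if existing_references.isEmpty then false
  else pvLoopB current_ref existing_references [("name", true), ("email", true), ("phone", false)]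

-- ===== PRECONDITION & SPEC =====
-- Pre_ excludes exactly the inputs on which Python A raises KeyError: a key missing among the
-- fields A's lazy scan actually reads before it returns (A reads later references' fields only
-- until the first match, and email/phone fields only when the earlier checks fall through).
def pvHasKey (d : List (String × String)) (k : String) : Bool := d.any (fun p => p.1 == k)
def pvNameMatch (cur r : List (String × String)) : Bool :=
  (PySem.Str.lower (pvField cur "name") == PySem.Str.lower (pvField r "name")) && (pvField r "name" != "")
def pvEmailMatch (cur r : List (String × String)) : Bool :=
  (pvField r "email" != "") && (PySem.Str.lower (pvField cur "email") == PySem.Str.lower (pvField r "email"))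
def pvPhoneMatch (cur r : List (String × String)) : Bool :=
  (pvField r "phone" != "") && (pvField cur "phone" == pvField r "phone")
-- the (totalized) per-reference match decision of the scan
def pvMatch (cur r : List (String × String)) : Bool :=
  pvNameMatch cur r || ((pvField cur "email" != "") && pvEmailMatch cur r)
    || ((pvField cur "phone" != "") && pvPhoneMatch cur r)
-- every key the scan reads while deciding reference r is present
def pvOk (cur r : List (String × String)) : Bool :=
  pvHasKey r "name" &&
    (pvNameMatch cur r ||
      (pvHasKey cur "email" && (pvField cur "email" == "" || pvHasKey r "email") &&
        (((pvField cur "email" != "") && pvEmailMatch cur r) ||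
          (pvHasKey cur "phone" && (pvField cur "phone" == "" || pvHasKey r "phone")))))
def Pre_is_duplicate_reference (current_ref : List (String × String)) (existing_references : List (List (String × String))) : Prop :=
  pvHasKey current_ref "name" = true ∧
  (pvField current_ref "name" ≠ "" →
    (∀ r ∈ existing_references.takeWhile (fun r => !pvMatch current_ref r), pvOk current_ref r = true) ∧
    (∀ r ∈ (existing_references.dropWhile (fun r => !pvMatch current_ref r)).take 1, pvOk current_ref r = true))
instance (current_ref : List (String × String)) (existing_references : List (List (String × String))) : Decidable (Pre_is_duplicate_reference current_ref existing_references) := by unfold Pre_is_duplicate_reference; infer_instance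

def pvWitness_is_duplicate_reference : (List (String × String)) × (List (List (String × String))) :=
  ([("name", "Al"), ("email", "a@b"), ("phone", "1")],
   [[("name", "al"), ("email", ""), ("phone", "")]])

def Spec_is_duplicate_reference (current_ref : List (String × String)) (existing_references : List (List (String × String))) (out : Bool) : Prop := out = is_duplicate_reference_alt current_ref existing_references
instance (current_ref : List (String × String)) (existing_references : List (List (String × String))) (out : Bool) : Decidable (Spec_is_duplicate_reference current_ref existing_references out) := by unfold Spec_is_duplicate_reference; infer_instance

-- ===== CLAIM (what is proved, stated in full; the proofs are below) =====
def Claim_equal_is_duplicate_reference : Prop := ∀ (current_ref : List (String × String)) (existing_references : List (List (String × String))), Dom_is_duplicate_reference current_ref existing_references → Pre_is_duplicate_reference current_ref existing_references → Spec_is_duplicate_reference current_ref existing_references (is_duplicate_reference current_ref existing_references)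

-- ===== LEMMAS AND PROOFS =====

-- A's scan equals the disjunction of three per-field scans
lemma scanA_eq (cur : List (String × String)) (exs : List (List (String × String))) :
    pvScanA cur exs =
      (exs.any (fun r => (pvField r "name" != "") && (PySem.Str.lower (pvField cur "name") == PySem.Str.lower (pvField r "name")))
       || ((pvField cur "email" != "") && exs.any (fun r => (pvField r "email" != "") && (PySem.Str.lower (pvField cur "email") == PySem.Str.lower (pvField r "email"))))
       || ((pvField cur "phone" != "") && exs.any (fun r => (pvField r "phone" != "") && (pvField cur "phone" == pvField r "phone")))) := by
  induction exs with
  | nil => simp [pvScanA]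
  | cons r rest ih =>
    simp only [pvScanA, List.any_cons, ih]
    generalize (PySem.Str.lower (pvField cur "name") == PySem.Str.lower (pvField r "name")) = a1
    generalize (pvField r "name" != "") = b1
    generalize (pvField cur "email" != "") = e0
    generalize (pvField r "email" != "") = e1
    generalize (PySem.Str.lower (pvField cur "email") == PySem.Str.lower (pvField r "email")) = e2
    generalize (pvField cur "phone" != "") = p0
    generalize (pvField r "phone" != "") = p1
    generalize (pvField cur "phone" == pvField r "phone") = p2
    generalize (rest.any (fun r => (pvField r "name" != "") && (PySem.Str.lower (pvField cur "name") == PySem.Str.lower (pvField r "name")))) = A1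
    generalize (rest.any (fun r => (pvField r "email" != "") && (PySem.Str.lower (pvField cur "email") == PySem.Str.lower (pvField r "email")))) = A2
    generalize (rest.any (fun r => (pvField r "phone" != "") && (pvField cur "phone" == pvField r "phone"))) = A3
    revert a1 b1 e0 e1 e2 p0 p1 p2 A1 A2 A3
    decide

lemma str_beq_comm (a b : String) : (a == b) = (b == a) := by
  by_cases h : a = b
  · subst h; rfl
  · rw [beq_eq_false_iff_ne.mpr h, beq_eq_false_iff_ne.mpr (Ne.symm h)]

-- B's per-field scan, with the equality test flipped to A's orientation
lemma anyB_eq (exs : List (List (String × String))) (key target : String) (fold : Bool) :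
    pvAnyB exs key target fold =
      exs.any (fun r => (pvField r key != "") && (target == pvNorm fold (pvField r key))) := by
  unfold pvAnyB
  congr 1; funext r
  rw [str_beq_comm]

-- B's field-table loop, unrolled to the same disjunction as scanA_eq
lemma loopB_eq (cur : List (String × String)) (exs : List (List (String × String)))
    (h : pvField cur "name" ≠ "") :
    pvLoopB cur exs [("name", true), ("email", true), ("phone", false)] =
      (exs.any (fun r => (pvField r "name" != "") && (PySem.Str.lower (pvField cur "name") == PySem.Str.lower (pvField r "name")))
       || ((pvField cur "email" != "") && exs.any (fun r => (pvField r "email" != "") && (PySem.Str.lower (pvField cur "email") == PySem.Str.lower (pvField r "email"))))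
       || ((pvField cur "phone" != "") && exs.any (fun r => (pvField r "phone" != "") && (pvField cur "phone" == pvField r "phone")))) := by
  simp only [pvLoopB, anyB_eq, pvNorm]
  generalize (exs.any (fun r => (pvField r "name" != "") && (PySem.Str.lower (pvField cur "name") == PySem.Str.lower (pvField r "name")))) = A1
  generalize (exs.any (fun r => (pvField r "email" != "") && (PySem.Str.lower (pvField cur "email") == PySem.Str.lower (pvField r "email")))) = A2
  generalize (exs.any (fun r => (pvField r "phone" != "") && (pvField cur "phone" == pvField r "phone"))) = A3
  by_cases he : pvField cur "email" = "" <;>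
    by_cases hp : pvField cur "phone" = "" <;>
      [skip; skip; skip; skip] <;>
      simp only [h, he, hp, reduceIte, bne_self_eq_false, Bool.false_and] <;>
      cases A1 <;> cases A2 <;> cases A3 <;> simp [he, hp]

-- ===== VERDICT (by name: the statement is the Claim_ definition above) =====
theorem is_duplicate_reference_spec : Claim_equal_is_duplicate_reference := by
  intro cur exs _dom _pre
  unfold Spec_is_duplicate_reference is_duplicate_reference is_duplicate_reference_alt
  by_cases h : pvField cur "name" = ""
  · simp [h]
  · rcases exs with _ | ⟨r, rest⟩
    · simp [pvScanA, h]
    · simp only [h, if_false, List.isEmpty_cons, Bool.false_eq_true]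
      rw [scanA_eq, loopB_eq cur (r :: rest) h]
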